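-- pv_equiv track=rewrite | github.com/tommysgit/Coding-Test | 프로그래머스/22 하반기 모의고사/1차 문제집/1-2.py | solution
-- ===== SOURCE A (Python) =====
-- from collections import Counter
--
-- def solution(want, number, discount):
--     answer = 0
--     for i in range(len(discount) - 9):
--         counter_hash = Counter(discount[i:i+10])
--         is_success = 1
--         for j in range(len(want)):
--             product = want[j]
--             num = number[j]
--             # 존재하지 않거나 충족이 안되면 탈출
--             if product not in counter_hash or counter_hash[product] < num:
--                 is_success = 0
--                 break
--         if is_success:
--             answer += 1
--     return answer
-- ===== SOURCE B (Python) =====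
-- from collections import Counter
--
-- def solution(want, number, discount):
--     # Sliding 10-day window: update the counter incrementally instead of
--     # rebuilding it from a slice for every window; zero counts are dropped
--     # so the counter lists exactly the products on discount in the window.
--     answer = 0
--     if len(discount) < 10:
--         return answer
--     cnt = Counter(discount[:10])
--     for i in range(len(discount) - 9):
--         if i:
--             out = discount[i - 1]
--             cnt[out] -= 1
--             if not cnt[out]:
--                 del cnt[out]
--             cnt[discount[i + 9]] += 1
--         if all(p in cnt and cnt[p] >= t for p, t in zip(want, number)):
--             answer += 1
--     return answer
-- ===== Notes on version B (the rewrite author's own statement) =====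
-- stated objective: alternative
-- what changed: B maintains one sliding-window counter updated incrementally per shift (decrement the leaving day, drop zero entries, increment the entering day) instead of rebuilding a Counter from a fresh 10-element slice for every window; Pre_ excludes inputs where len(number) < len(want) while a window exists, on which A raises IndexError unless an earlier unmet condition breaks first.
-- outside the precondition, e.g. on solution(['x', 'y'], [1], ['a', 'a', 'a', 'a', 'a', 'a', 'a', 'a', 'a', 'a']): A returns 0, B returns 0
import Mathlib
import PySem

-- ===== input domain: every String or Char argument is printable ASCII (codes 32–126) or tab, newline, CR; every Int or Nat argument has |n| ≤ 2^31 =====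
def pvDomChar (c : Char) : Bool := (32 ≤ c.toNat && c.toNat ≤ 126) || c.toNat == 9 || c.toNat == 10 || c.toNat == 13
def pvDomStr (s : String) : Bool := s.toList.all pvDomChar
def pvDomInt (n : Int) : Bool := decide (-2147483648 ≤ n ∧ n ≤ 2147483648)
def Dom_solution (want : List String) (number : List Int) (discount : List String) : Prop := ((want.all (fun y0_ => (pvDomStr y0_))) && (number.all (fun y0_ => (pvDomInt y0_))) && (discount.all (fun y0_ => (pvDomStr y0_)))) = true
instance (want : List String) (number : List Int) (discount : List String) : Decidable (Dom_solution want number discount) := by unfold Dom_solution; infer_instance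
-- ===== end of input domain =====

-- B maintains one sliding-window counter updated incrementally at each shift instead of
-- rebuilding a Counter from a fresh 10-element slice for every window (alternative algorithm).

-- ===== PORT A =====
-- the inner 'for j in range(len(want))' with its break, as structural recursion on the index list;
-- want[j]/number[j] via pyGet?: under Pre_ both indices are in range (Python raises outside Pre_)
def solutionInner (want : List String) (number : List Int) (counterHash : PySem.Dict String Int) : List Int → Int
  | [] => 1
  | j :: rest =>
    let product := (PySem.List.pyGet? want j).getD ""
    let num := (PySem.List.pyGet? number j).getD 0
    if !(counterHash.contains product) || counterHash.getD product 0 < num then 0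
    else solutionInner want number counterHash rest

-- one iteration of A's outer loop
def aStep (want : List String) (number : List Int) (discount : List String)
    (answer : Int) (i : Int) : Int :=
  let counterHash := PySem.Dict.counter (PySem.List.slice discount (some i) (some (i + 10)))
  let isSuccess := solutionInner want number counterHash (PySem.List.pyRange 0 (want.length : Int) 1)
  if isSuccess ≠ 0 then answer + 1 else answer

def solution (want : List String) (number : List Int) (discount : List String) : Int :=
  (PySem.List.pyRange 0 ((discount.length : Int) - 9) 1).foldl (aStep want number discount) 0

-- ===== PORT B =====
-- the 'if i:' window update of Source B: decrement the leaving element, delete it at zero,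
-- increment the entering element (Counter getitem defaults to 0, hence getD _ 0)
def altUpd (discount : List String) (cnt : PySem.Dict String Int) (i : Int) : PySem.Dict String Int :=
  let outE := (PySem.List.pyGet? discount (i - 1)).getD ""
  let c1 := cnt.insert outE (cnt.getD outE 0 - 1)
  let c2 := if c1.getD outE 0 == 0 then c1.erase outE else c1
  let inE := (PySem.List.pyGet? discount (i + 9)).getD ""
  c2.insert inE (c2.getD inE 0 + 1)

-- one iteration of Source B's loop over the state (cnt, answer)
def altStep (want : List String) (number : List Int) (discount : List String)
    (st : PySem.Dict String Int × Int) (i : Int) : PySem.Dict String Int × Int :=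
  let cnt := if i ≠ 0 then altUpd discount st.1 i else st.1
  if (want.zip number).all (fun pt => cnt.contains pt.1 && decide (cnt.getD pt.1 0 ≥ pt.2))
  then (cnt, st.2 + 1) else (cnt, st.2)

def solution_alt (want : List String) (number : List Int) (discount : List String) : Int :=
  if discount.length < 10 then 0
  else
    ((PySem.List.pyRange 0 ((discount.length : Int) - 9) 1).foldl (altStep want number discount)
      (PySem.Dict.counter (PySem.List.slice discount none (some 10)), 0)).2

-- ===== PRECONDITION & SPEC =====
-- Pre_ excludes inputs with len(number) < len(want) while at least one window exists: there A
-- raises IndexError unless an earlier unmet condition breaks first (B's zip ignores unpaired wants).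
def Pre_solution (want : List String) (number : List Int) (discount : List String) : Prop :=
  want.length ≤ number.length ∨ discount.length < 10
instance (want : List String) (number : List Int) (discount : List String) : Decidable (Pre_solution want number discount) := by unfold Pre_solution; infer_instance

def pvWitness_solution : List String × List Int × List String :=
  (["a", "b"], [2, 1], ["a", "b", "a", "c", "a", "b", "c", "a", "b", "a", "c"])

def Spec_solution (want : List String) (number : List Int) (discount : List String) (out : Int) : Prop := out = solution_alt want number discount
instance (want : List String) (number : List Int) (discount : List String) (out : Int) : Decidable (Spec_solution want number discount out) := by unfold Spec_solution; infer_instance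

-- ===== CLAIM (what is proved, stated in full; the proofs are below) =====
def Claim_equal_solution : Prop := ∀ (want : List String) (number : List Int) (discount : List String), Dom_solution want number discount → Pre_solution want number discount → Spec_solution want number discount (solution want number discount)

-- ===== LEMMAS AND PROOFS =====

-- dict lemmas about erase (not in the PySem lemma list)
theorem pv_get?_erase {κ ν : Type} [BEq κ] [LawfulBEq κ] [DecidableEq κ] (d : PySem.Dict κ ν) (k k' : κ) :
    (d.erase k).get? k' = if k' = k then none else d.get? k' := by
  rcases d with ⟨items⟩
  simp only [PySem.Dict.erase, PySem.Dict.get?]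
  induction items with
  | nil => simp
  | cons p rest ih =>
    by_cases h1 : p.1 = k
    · rw [List.filter_cons_of_neg (by simp [h1]), ih]
      by_cases h2 : k' = k
      · rw [if_pos h2, if_pos h2]
      · have hne : ¬ p.1 = k' := fun h => h2 (h ▸ h1)
        rw [if_neg h2, if_neg h2, List.find?_cons_of_neg (by simp [hne])]
    · rw [List.filter_cons_of_pos (by simp [h1])]
      by_cases h2 : p.1 = k'
      · have hne : ¬ k' = k := fun h => h1 (h2.trans h)
        rw [List.find?_cons_of_pos (by simp [h2]), List.find?_cons_of_pos (by simp [h2]), if_neg hne]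
      · rw [List.find?_cons_of_neg (by simp [h2]), List.find?_cons_of_neg (by simp [h2]), ih]

theorem pv_getD_erase {κ ν : Type} [BEq κ] [LawfulBEq κ] [DecidableEq κ] (d : PySem.Dict κ ν) (k k' : κ) (d0 : ν) :
    (d.erase k).getD k' d0 = if k' = k then d0 else d.getD k' d0 := by
  rw [PySem.Dict.getD_eq_get?_getD, pv_get?_erase, PySem.Dict.getD_eq_get?_getD]
  by_cases h : k' = k <;> simp [h]

theorem pv_contains_erase {κ ν : Type} [BEq κ] [LawfulBEq κ] [DecidableEq κ] (d : PySem.Dict κ ν) (k k' : κ) :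
    (d.erase k).contains k' = if k' = k then false else d.contains k' := by
  rw [PySem.Dict.contains_eq_isSome_get?, pv_get?_erase, PySem.Dict.contains_eq_isSome_get?]
  by_cases h : k' = k <;> simp [h]

-- the loop invariant: the dict views exactly the counts of the current window
def pvInv (w : List String) (c : PySem.Dict String Int) : Prop :=
  ∀ p : String, c.getD p 0 = (w.count p : Int) ∧ (c.contains p = true ↔ p ∈ w)

theorem pvBase (discount : List String) :
    pvInv ((discount.drop 0).take 10) (PySem.Dict.counter (PySem.List.slice discount none (some 10))) := by
  have hs : PySem.List.slice discount none (some (10 : Int)) = discount.take 10 := by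
    exact_mod_cast PySem.List.slice_to_natCast discount 10
  intro p
  rw [hs, PySem.Dict.getD_counter, PySem.Dict.contains_counter, List.drop_zero]
  exact ⟨rfl, by rw [List.contains_iff_mem]⟩

-- shifting the window by one preserves the invariant
theorem pvStep (discount : List String) (i : Int) (c : PySem.Dict String Int)
    (h1 : 1 ≤ i) (h2 : i + 9 < (discount.length : Int))
    (hR : pvInv ((discount.drop (i.toNat - 1)).take 10) c) :
    pvInv ((discount.drop i.toNat).take 10) (altUpd discount c i) := by
  have hi1 : i.toNat - 1 < discount.length := by omega
  have hi9 : i.toNat + 9 < discount.length := by omega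
  have hg1 : (PySem.List.pyGet? discount (i - 1)).getD "" = discount[i.toNat - 1] := by
    rw [show i - 1 = ((i.toNat - 1 : Nat) : Int) by omega, PySem.List.pyGet?_natCast,
      List.getElem?_eq_getElem hi1, Option.getD_some]
  have hg9 : (PySem.List.pyGet? discount (i + 9)).getD "" = discount[i.toNat + 9] := by
    rw [show i + 9 = ((i.toNat + 9 : Nat) : Int) by omega, PySem.List.pyGet?_natCast,
      List.getElem?_eq_getElem hi9, Option.getD_some]
  have hlen9 : 9 < (discount.drop i.toNat).length := by simp; omega
  have eW1 : (discount.drop (i.toNat - 1)).take 10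
      = discount[i.toNat - 1] :: (discount.drop i.toNat).take 9 := by
    rw [List.drop_eq_getElem_cons hi1, show i.toNat - 1 + 1 = i.toNat by omega,
      show (10 : Nat) = 9 + 1 from rfl, List.take_succ_cons]
  have eW2 : (discount.drop i.toNat).take 10
      = (discount.drop i.toNat).take 9 ++ [discount[i.toNat + 9]] := by
    rw [show (10 : Nat) = 9 + 1 from rfl, List.take_add_one, List.getElem?_eq_getElem hlen9]
    congr 1
    simp [List.getElem_drop]
  set o := discount[i.toNat - 1] with ho
  set q := discount[i.toNat + 9] with hq
  set mid := (discount.drop i.toNat).take 9 with hmid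
  have hco : c.getD o 0 = (mid.count o : Int) + 1 := by
    rw [(hR o).1, eW1, List.count_cons_self]; push_cast; ring
  -- the dict after decrement (+ possible delete): exactly the counts of mid
  have hc2g : ∀ r, ((if (c.insert o (c.getD o 0 - 1)).getD o 0 == 0
        then (c.insert o (c.getD o 0 - 1)).erase o else c.insert o (c.getD o 0 - 1)).getD r 0)
      = (mid.count r : Int) := by
    intro r
    by_cases hz : (c.insert o (c.getD o 0 - 1)).getD o 0 == 0
    · rw [if_pos hz, pv_getD_erase]
      have h0 : (mid.count o : Int) = 0 := by
        have := hz
        rw [PySem.Dict.getD_insert, if_pos rfl, hco] at this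
        have := beq_iff_eq.mp this
        omega
      by_cases hro : r = o
      · rw [if_pos hro, hro]; omega
      · rw [if_neg hro, PySem.Dict.getD_insert, if_neg hro, (hR r).1, eW1,
          List.count_cons_of_ne (by exact fun h => hro (by simpa using h.symm))]
    · rw [if_neg hz, PySem.Dict.getD_insert]
      by_cases hro : r = o
      · rw [if_pos hro, hro, hco]; ring
      · rw [if_neg hro, (hR r).1, eW1,
          List.count_cons_of_ne (by exact fun h => hro (by simpa using h.symm))]
  have hc2c : ∀ r, (((if (c.insert o (c.getD o 0 - 1)).getD o 0 == 0
        then (c.insert o (c.getD o 0 - 1)).erase o else c.insert o (c.getD o 0 - 1)).contains r) = true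
      ↔ r ∈ mid) := by
    intro r
    by_cases hz : (c.insert o (c.getD o 0 - 1)).getD o 0 == 0
    · have h0 : mid.count o = 0 := by
        have := hz
        rw [PySem.Dict.getD_insert, if_pos rfl, hco] at this
        have := beq_iff_eq.mp this
        omega
      rw [if_pos hz, pv_contains_erase]
      by_cases hro : r = o
      · rw [if_pos hro, hro]
        simp only [Bool.false_eq_true, false_iff]
        intro hmem
        exact absurd h0 (by have := List.count_pos_iff.mpr hmem; omega)
      · rw [if_neg hro, PySem.Dict.contains_insert]
        rw [Bool.or_eq_true, beq_iff_eq]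
        rw [(hR r).2, eW1, List.mem_cons]
        constructor
        · rintro (h | h); exact absurd h hro
          rcases h with h | h; exact absurd h hro; exact h
        · intro h; exact Or.inr (Or.inr h)
    · have h0 : mid.count o ≠ 0 := by
        intro hc0
        apply hz
        rw [PySem.Dict.getD_insert, if_pos rfl, hco]
        have : (mid.count o : Int) = 0 := by exact_mod_cast hc0
        rw [this]
        decide
      rw [if_neg hz, PySem.Dict.contains_insert, Bool.or_eq_true, beq_iff_eq]
      rw [(hR r).2, eW1, List.mem_cons]
      constructor
      · rintro (h | h | h)
        · exact h ▸ List.count_pos_iff.mp (by omega)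
        · exact h ▸ List.count_pos_iff.mp (by omega)
        · exact h
      · intro h; exact Or.inr (Or.inr h)
  intro p
  unfold altUpd
  rw [hg1, hg9]
  constructor
  · rw [PySem.Dict.getD_insert, eW2, List.count_append]
    by_cases hpq : p = q
    · rw [if_pos hpq, hc2g, hpq]
      have h1 : List.count q [q] = 1 := by simp
      rw [h1]; push_cast; ring
    · rw [if_neg hpq, hc2g]
      have h0 : List.count p [q] = 0 := List.count_eq_zero.mpr (by simp [hpq])
      rw [h0]; push_cast; ring
  · rw [PySem.Dict.contains_insert, Bool.or_eq_true, beq_iff_eq, hc2c, eW2, List.mem_append,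
      List.mem_singleton]
    tauto

-- A's break-loop is an 'all' over the index list
theorem pv_inner_eq (want : List String) (number : List Int) (d : PySem.Dict String Int) :
    ∀ l : List Int, solutionInner want number d l =
      if ∀ j ∈ l, (d.contains ((PySem.List.pyGet? want j).getD "") = true ∧
            ¬ d.getD ((PySem.List.pyGet? want j).getD "") 0 < (PySem.List.pyGet? number j).getD 0)
      then 1 else 0 := by
  intro l
  induction l with
  | nil => simp [solutionInner]
  | cons j rest ih =>
    rw [solutionInner, ih]
    by_cases hc : d.contains ((PySem.List.pyGet? want j).getD "") = true
    · by_cases hl : d.getD ((PySem.List.pyGet? want j).getD "") 0 < (PySem.List.pyGet? number j).getD 0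
      · simp [hc, hl]
      · rw [not_lt] at hl
        simp [hc, hl]
    · simp [hc]

-- B's window check on an invariant-respecting dict equals A's check on the window's Counter
theorem pvCheck (want : List String) (number : List Int) (hlen : want.length ≤ number.length)
    (w : List String) (c : PySem.Dict String Int) (hR : pvInv w c) :
    ((want.zip number).all (fun pt => c.contains pt.1 && decide (c.getD pt.1 0 ≥ pt.2)))
    = decide (solutionInner want number (PySem.Dict.counter w)
        (PySem.List.pyRange 0 (want.length : Int) 1) ≠ 0) := by
  rw [pv_inner_eq, Bool.eq_iff_iff, List.all_eq_true]
  have hcond : ∀ (k : Nat) (hkw : k < want.length) (hkn : k < number.length),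
      ((c.contains want[k] && decide (c.getD want[k] 0 ≥ number[k])) = true)
      ↔ ((PySem.Dict.counter w).contains want[k] = true ∧
          ¬ (PySem.Dict.counter w).getD want[k] 0 < (number[k] : Int)) := by
    intro k hkw hkn
    rw [Bool.and_eq_true, decide_eq_true_eq, PySem.Dict.contains_counter,
      PySem.Dict.getD_counter, List.contains_iff_mem, (hR want[k]).2, (hR want[k]).1, not_lt,
      ge_iff_le]
  constructor
  · intro hB
    simp only [ne_eq, ite_eq_right_iff, one_ne_zero, imp_false, not_not, decide_eq_true_eq]
    intro j hj
    rw [PySem.List.mem_pyRange_one] at hj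
    obtain ⟨hj0, hju⟩ := hj
    have hkw : j.toNat < want.length := by omega
    have hkn : j.toNat < number.length := by omega
    have hjk : j = ((j.toNat : Nat) : Int) := by omega
    rw [hjk, PySem.List.pyGet?_natCast, PySem.List.pyGet?_natCast,
      List.getElem?_eq_getElem hkw, List.getElem?_eq_getElem hkn, Option.getD_some, Option.getD_some]
    have hmem : (want[j.toNat], number[j.toNat]) ∈ want.zip number := by
      rw [List.mem_iff_getElem]
      exact ⟨j.toNat, by rw [List.length_zip]; omega, by rw [List.getElem_zip]⟩
    exact (hcond j.toNat hkw hkn).mp (hB _ hmem)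
  · intro hA pt hpt
    obtain ⟨k, hk, rfl⟩ := List.mem_iff_getElem.mp hpt
    have hkw : k < want.length := by rw [List.length_zip] at hk; omega
    have hkn : k < number.length := by rw [List.length_zip] at hk; omega
    simp only [ne_eq, ite_eq_right_iff, one_ne_zero, imp_false, not_not, decide_eq_true_eq] at hA
    have hj := hA (k : Int) (by rw [PySem.List.mem_pyRange_one]; exact ⟨by positivity, by exact_mod_cast hkw⟩)
    rw [PySem.List.pyGet?_natCast, PySem.List.pyGet?_natCast,
      List.getElem?_eq_getElem hkw, List.getElem?_eq_getElem hkn, Option.getD_some, Option.getD_some] at hj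
    rw [List.getElem_zip]
    exact (hcond k hkw hkn).mpr hj

-- the tail of both loops agrees, given the invariant for the previous window
theorem pvLoop (want : List String) (number : List Int) (discount : List String)
    (hlen : want.length ≤ number.length) :
    ∀ (k : Nat) (i : Int) (c : PySem.Dict String Int) (ans : Int),
      1 ≤ i → i + k = (discount.length : Int) - 9 →
      pvInv ((discount.drop (i.toNat - 1)).take 10) c →
      ((PySem.List.pyRange i ((discount.length : Int) - 9) 1).foldl (altStep want number discount) (c, ans)).2
        = (PySem.List.pyRange i ((discount.length : Int) - 9) 1).foldl (aStep want number discount) ans := by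
  intro k
  induction k with
  | zero =>
    intro i c ans h1 h2 hR
    rw [PySem.List.pyRange_one_eq_nil (by omega)]
    simp
  | succ k ih =>
    intro i c ans h1 h2 hR
    have hib : i < (discount.length : Int) - 9 := by omega
    rw [PySem.List.pyRange_one_cons hib]
    simp only [List.foldl_cons]
    have hstep := pvStep discount i c h1 (by omega) hR
    have hsl : PySem.List.slice discount (some i) (some (i + 10)) = (discount.drop i.toNat).take 10 := by
      rw [PySem.List.slice_toNat discount (by omega) (by omega)]
      congr 1
      omega
    have hcheck := pvCheck want number hlen _ _ hstep
    have hst : altStep want number discount (c, ans) i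
        = (altUpd discount c i, aStep want number discount ans i) := by
      simp only [altStep, aStep, if_pos (show i ≠ 0 by omega), hsl, hcheck, decide_eq_true_eq]
      by_cases hP : solutionInner want number (PySem.Dict.counter ((discount.drop i.toNat).take 10))
          (PySem.List.pyRange 0 (want.length : Int) 1) ≠ 0
      · rw [if_pos hP, if_pos hP]
      · rw [if_neg hP, if_neg hP]
    rw [hst]
    exact ih (i + 1) _ _ (by omega) (by omega)
      (by rw [show (i + 1).toNat - 1 = i.toNat by omega]; exact hstep)

-- ===== VERDICT (by name: the statement is the Claim_ definition above) =====
theorem solution_spec : Claim_equal_solution := by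
  intro want number discount hdom hpre
  unfold Spec_solution
  by_cases h10 : discount.length < 10
  · simp only [solution, solution_alt, if_pos h10]
    rw [PySem.List.pyRange_one_eq_nil (by omega)]
    simp
  · have hlen : want.length ≤ number.length := by
      rcases hpre with h | h
      · exact h
      · exact absurd h h10
    simp only [solution, solution_alt, if_neg h10]
    rw [PySem.List.pyRange_one_cons (show (0 : Int) < (discount.length : Int) - 9 by omega)]
    simp only [List.foldl_cons]
    have hbase := pvBase discount
    have hsl0 : PySem.List.slice discount (some (0 : Int)) (some ((0 : Int) + 10))
        = (discount.drop 0).take 10 := by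
      rw [PySem.List.slice_toNat discount (by omega) (by omega)]
      norm_num
      omega
    have hcheck := pvCheck want number hlen _ _ hbase
    have hst0 : altStep want number discount
          (PySem.Dict.counter (PySem.List.slice discount none (some 10)), 0) 0
        = (PySem.Dict.counter (PySem.List.slice discount none (some 10)),
           aStep want number discount 0 0) := by
      simp only [altStep, aStep, if_neg (show ¬ ((0 : Int) ≠ 0) by simp), hsl0, hcheck,
        decide_eq_true_eq]
      by_cases hP : solutionInner want number (PySem.Dict.counter ((discount.drop 0).take 10))
          (PySem.List.pyRange 0 (want.length : Int) 1) ≠ 0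
      · rw [if_pos hP, if_pos hP]
      · rw [if_neg hP, if_neg hP]
    rw [hst0]
    simp only [zero_add]
    exact (pvLoop want number discount hlen (discount.length - 10) 1 _ _ (by omega) (by omega)
      (by simpa using hbase)).symm
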